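-- pv_equiv track=rewrite | github.com/dhruv11011/Information-Security-Lab | Playfair_cipher.py | divideTheWord
-- ===== SOURCE A (Python) =====
-- def divideTheWord(a):
--     string = ""
--     i = 0
--     while i < len(a):
--         try:
--             if a[i] != a[i + 1]:
--                 string += f"{a[i] + a[i + 1]} "
--                 i += 2
--             else:
--                 string += f"{a[i]}X "
--                 i += 1
--         except:
--             string += f"{a[i]}X "
--             i += 1
--     return string.split()
-- ===== SOURCE B (Python) =====
-- def divideTheWord(a):
--     pairs = []
--     pending = None
--     for ch in a:
--         if pending is None:
--             pending = ch
--         elif ch != pending: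
--             pairs.append(pending + ch)
--             pending = None
--         else:
--             pairs.append(pending + "X")
--             pending = ch
--     if pending is not None:
--         pairs.append(pending + "X")
--     return [w for d in pairs for w in d.split()]
-- ===== Notes on version B (the rewrite author's own statement) =====
-- stated objective: faster
-- what changed: Replaces A's index-based while loop with a[i+1] lookahead guarded by try/except, its quadratic build-one-big-string-by-+= and final split(), by a single for-pass keeping the unpaired letter in a `pending` variable, appending each finished digraph to a list and flattening each digraph's own split() at the end.
import Mathlib
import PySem

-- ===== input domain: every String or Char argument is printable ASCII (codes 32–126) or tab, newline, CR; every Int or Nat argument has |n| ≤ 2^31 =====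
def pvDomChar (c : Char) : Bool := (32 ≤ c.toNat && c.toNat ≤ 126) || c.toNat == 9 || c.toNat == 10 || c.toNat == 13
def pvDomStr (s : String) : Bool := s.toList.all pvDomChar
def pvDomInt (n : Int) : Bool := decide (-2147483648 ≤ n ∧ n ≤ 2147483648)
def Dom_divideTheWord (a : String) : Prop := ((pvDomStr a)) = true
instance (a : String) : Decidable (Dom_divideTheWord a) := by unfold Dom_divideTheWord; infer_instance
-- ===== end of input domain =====

-- B replaces A's index-lookahead while loop and join-then-split by a single pass
-- with a `pending` first letter, flattening each digraph's own split() (simpler).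

-- ===== PORT A =====
-- A's while loop: i advances by 2 (distinct pair) or 1 (doubled letter, or the
-- lookahead a[i+1] raising IndexError, rendered as the `none` branch of pyGet?).
-- The accumulated Python string is carried as a List Char.
def divideTheWordLoop (l : List Char) (i : Nat) (s : List Char) : List Char :=
  if h : i < l.length then
    match PySem.List.pyGet? l ((i : Int) + 1) with
    | some d =>
        if l[i] ≠ d then divideTheWordLoop l (i + 2) (s ++ [l[i], d, ' '])
        else divideTheWordLoop l (i + 1) (s ++ [l[i], 'X', ' '])
    | none => divideTheWordLoop l (i + 1) (s ++ [l[i], 'X', ' '])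
  else s
termination_by l.length - i

def divideTheWord (a : String) : List String :=
  PySem.Str.split₀ (String.ofList (divideTheWordLoop a.toList 0 []))

-- ===== PORT B =====
-- the loop body of Source B as a fold step over (pairs, pending)
def divideTheWordAltStep (st : List String × Option Char) (ch : Char) : List String × Option Char :=
  match st.2 with
  | none => (st.1, some ch)
  | some p =>
      if ch ≠ p then (st.1 ++ [String.ofList [p, ch]], none)
      else (st.1 ++ [String.ofList [p, 'X']], some ch)

def divideTheWord_alt (a : String) : List String :=
  let st := a.toList.foldl divideTheWordAltStep ([], none)
  let pairs := match st.2 with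
    | none => st.1
    | some p => st.1 ++ [String.ofList [p, 'X']]
  pairs.flatMap PySem.Str.split₀

-- ===== PRECONDITION & SPEC =====
def Spec_divideTheWord (a : String) (out : List String) : Prop := out = divideTheWord_alt a
instance (a : String) (out : List String) : Decidable (Spec_divideTheWord a out) := by unfold Spec_divideTheWord; infer_instance

-- ===== CLAIM (what is proved, stated in full; the proofs are below) =====
def Claim_equal_divideTheWord : Prop := ∀ (a : String), Dom_divideTheWord a → Spec_divideTheWord a (divideTheWord a)

-- ===== LEMMAS AND PROOFS =====

-- the common digraph decomposition both programs compute
def pvPairs : List Char → List (List Char)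
  | [] => []
  | [c] => [[c, 'X']]
  | c :: d :: t => if c ≠ d then [c, d] :: pvPairs t else [c, 'X'] :: pvPairs (d :: t)
termination_by l => l.length

-- A's loop produces the digraphs of the remaining suffix, each followed by a space
theorem pvLoop_eq (l : List Char) (i : Nat) (s : List Char) :
    divideTheWordLoop l i s = s ++ ((pvPairs (l.drop i)).map (· ++ [' '])).flatten := by
  fun_induction divideTheWordLoop l i s with
  | case1 i s h d hd h2 ih =>
      have hc : ((i : Int) + 1) = ((i + 1 : Nat) : Int) := by push_cast; ring
      rw [hc, PySem.List.pyGet?_natCast] at hd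
      have h1 : i + 1 < l.length := by
        by_contra hc2
        rw [List.getElem?_eq_none (by omega)] at hd
        simp at hd
      rw [List.getElem?_eq_getElem h1] at hd
      have hdv : d = l[i + 1] := (Option.some.inj hd).symm
      subst hdv
      have hdrop : List.drop i l = l[i] :: l[i + 1] :: List.drop (i + 2) l := by
        conv_lhs => rw [← List.getElem_cons_drop h, ← List.getElem_cons_drop h1]
      rw [ih, hdrop]
      simp only [pvPairs]
      rw [if_pos h2]
      simp
  | case2 i s h d hd h2 ih =>
      have hc : ((i : Int) + 1) = ((i + 1 : Nat) : Int) := by push_cast; ring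
      rw [hc, PySem.List.pyGet?_natCast] at hd
      have h1 : i + 1 < l.length := by
        by_contra hc2
        rw [List.getElem?_eq_none (by omega)] at hd
        simp at hd
      rw [List.getElem?_eq_getElem h1] at hd
      have hdv : d = l[i + 1] := (Option.some.inj hd).symm
      subst hdv
      simp only [ne_eq, not_not] at h2
      have hdrop : List.drop i l = l[i] :: l[i + 1] :: List.drop (i + 2) l := by
        conv_lhs => rw [← List.getElem_cons_drop h, ← List.getElem_cons_drop h1]
      rw [ih, hdrop]
      simp only [pvPairs]
      rw [if_neg (by simp [h2])]
      have h3 : List.drop (i + 1) l = l[i + 1] :: List.drop (i + 2) l :=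
        (List.getElem_cons_drop h1).symm
      rw [← h3]
      simp
  | case3 i s h hd ih =>
      have hc : ((i : Int) + 1) = ((i + 1 : Nat) : Int) := by push_cast; ring
      rw [hc, PySem.List.pyGet?_natCast] at hd
      have h1 : ¬ i + 1 < l.length := by
        intro hc2
        rw [List.getElem?_eq_getElem hc2] at hd
        simp at hd
      have hdrop : l.drop i = [l[i]] := by
        rw [← List.getElem_cons_drop h, List.drop_eq_nil_of_le (by omega)]
      rw [ih, hdrop]
      have h2 : l.drop (i + 1) = [] := List.drop_eq_nil_of_le (by omega)
      rw [h2]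
      simp [pvPairs]
  | case4 i s h =>
      have : l.length ≤ i := by omega
      simp [List.drop_eq_nil_of_le this, pvPairs]

-- split₀.go only ever prepends already-finished words through its accumulator
theorem pvGo_acc' (s : List Char) : ∀ cur acc,
    PySem.Chars.split₀.go s cur acc = acc.reverse ++ PySem.Chars.split₀.go s cur [] := by
  induction s with
  | nil => intro cur acc; by_cases hc : cur.isEmpty <;> simp [PySem.Chars.split₀.go, hc]
  | cons c t ih =>
      intro cur acc
      by_cases hw : PySem.Chars.isspace c
      · by_cases hc : cur.isEmpty
        · simp only [PySem.Chars.split₀.go, hw, hc, if_true]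
          rw [ih [] acc]
        · simp only [PySem.Chars.split₀.go, hw, hc, if_true]
          rw [ih [] (cur.reverse :: acc), ih [] [cur.reverse]]
          simp
      · simp only [PySem.Chars.split₀.go, hw, Bool.false_eq_true, if_false]
        rw [ih (c :: cur) acc]

-- a space splits the string: words before it, then words after it
theorem pvSplit_space (x : List Char) : ∀ y cur acc,
    PySem.Chars.split₀.go (x ++ ' ' :: y) cur acc =
      PySem.Chars.split₀.go x cur acc ++ PySem.Chars.split₀.go y [] [] := by
  induction x with
  | nil =>
      intro y cur acc
      have hsp : PySem.Chars.isspace ' ' = true := by decide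
      by_cases hc : cur.isEmpty
      · simp only [List.nil_append, PySem.Chars.split₀.go, hsp, hc, if_true]
        rw [pvGo_acc' y [] acc]
      · simp only [List.nil_append, PySem.Chars.split₀.go, hsp, hc, if_true]
        rw [pvGo_acc' y [] (cur.reverse :: acc)]
        simp
  | cons c t ih =>
      intro y cur acc
      by_cases hw : PySem.Chars.isspace c
      · by_cases hc : cur.isEmpty <;>
          simp [List.cons_append, PySem.Chars.split₀.go, hw, hc, ih]
      · simp only [List.cons_append, PySem.Chars.split₀.go, hw, Bool.false_eq_true, if_false]
        rw [ih]

-- splitting space-terminated words = splitting each word on its own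
theorem pvSplit_words (ws : List (List Char)) :
    PySem.Chars.split₀ ((ws.map (· ++ [' '])).flatten) = ws.flatMap PySem.Chars.split₀ := by
  induction ws with
  | nil => simp [PySem.Chars.split₀, PySem.Chars.split₀.go]
  | cons w t ih =>
      simp only [List.map_cons, List.flatten_cons, List.flatMap_cons, ← ih]
      have : w ++ [' '] ++ (t.map (· ++ [' '])).flatten = w ++ ' ' :: (t.map (· ++ [' '])).flatten := by
        simp
      rw [this]
      unfold PySem.Chars.split₀
      rw [pvSplit_space]

-- B's fold (with the final flush) produces the digraphs of pending-chars ++ rest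
theorem pvFold_eq (l : List Char) : ∀ (res : List String) (p : Option Char),
    (match (l.foldl divideTheWordAltStep (res, p)).2 with
      | none => (l.foldl divideTheWordAltStep (res, p)).1
      | some q => (l.foldl divideTheWordAltStep (res, p)).1 ++ [String.ofList [q, 'X']]) =
    res ++ (pvPairs ((p.toList) ++ l)).map String.ofList := by
  induction l with
  | nil =>
      intro res p
      cases p <;> simp [pvPairs]
  | cons c t ih =>
      intro res p
      cases p with
      | none =>
          simp only [List.foldl_cons, divideTheWordAltStep, Option.toList_none, List.nil_append]
          exact ih res (some c)
      | some q =>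
          by_cases hq : c ≠ q
          · simp only [List.foldl_cons, divideTheWordAltStep, Option.toList_some]
            rw [if_pos hq, ih (res ++ [String.ofList [q, c]]) none]
            have hqc : q ≠ c := fun h => hq h.symm
            simp [pvPairs, hqc]
          · simp only [ne_eq, not_not] at hq
            subst hq
            simp only [List.foldl_cons, divideTheWordAltStep, Option.toList_some]
            rw [if_neg (by simp), ih (res ++ [String.ofList [c, 'X']]) (some c)]
            simp [pvPairs]

-- ===== VERDICT (by name: the statement is the Claim_ definition above) =====
theorem divideTheWord_spec : Claim_equal_divideTheWord := by
  intro a _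
  unfold Spec_divideTheWord divideTheWord divideTheWord_alt
  rw [pvLoop_eq]
  simp only [List.drop_zero, List.nil_append]
  have hB := pvFold_eq a.toList [] none
  simp only [Option.toList_none, List.nil_append] at hB
  rw [hB]
  have hA : PySem.Str.split₀ (String.ofList (((pvPairs a.toList).map (· ++ [' '])).flatten)) =
      ((pvPairs a.toList).flatMap PySem.Chars.split₀).map String.ofList := by
    unfold PySem.Str.split₀
    rw [String.toList_ofList, pvSplit_words]
  rw [hA]
  simp [List.map_flatMap, List.flatMap_map, PySem.Str.split₀, String.toList_ofList]
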